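-- pv_equiv track=rewrite | github.com/DeanoC/AIWhisperer | fix_remaining_indentation.py | fix_method_indentation
-- ===== SOURCE A (Python) =====
-- def fix_method_indentation(lines, line_num):
--     """Fix indentation for method bodies."""
--     # Line numbers are 1-based, array is 0-based
--     idx = line_num - 1
--
--     # Find the def line above
--     for i in range(idx - 1, -1, -1):
--         if lines[i].strip().startswith('def '):
--             # Get the indentation of the def line
--             def_indent = len(lines[i]) - len(lines[i].lstrip())
--             # Method body should be indented 4 more spaces
--             body_indent = def_indent + 4
--
--             # Fix all lines that need fixing
--             j = idx
--             while j < len(lines) and lines[j].strip():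
--                 if lines[j].strip():  # Don't modify empty lines
--                     current_indent = len(lines[j]) - len(lines[j].lstrip())
--                     # If this line has unexpected indent, fix it
--                     if current_indent != body_indent and not lines[j].strip().startswith('#'):
--                         lines[j] = ' ' * body_indent + lines[j].lstrip()
--                 j += 1
--             break
--
--     return lines
-- ===== SOURCE B (Python) =====
-- def fix_method_indentation(lines, line_num):
--     """Fix indentation for method bodies."""
--     idx = line_num - 1
--     out = []
--     mode = 'scan'       # 'scan': before idx, tracking the last def; 'fix': rewriting block; 'copy': rest untouched
--     def_indent = None
--     for k, line in enumerate(lines):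
--         if mode == 'scan' and k >= idx:
--             mode = 'fix' if def_indent is not None else 'copy'
--         if mode == 'scan':
--             if line.strip().startswith('def '):
--                 def_indent = len(line) - len(line.lstrip())
--             out.append(line)
--         elif mode == 'fix':
--             if not line.strip():
--                 mode = 'copy'
--                 out.append(line)
--             else:
--                 body = def_indent + 4
--                 if line.strip().startswith('#') or len(line) - len(line.lstrip()) == body:
--                     out.append(line)
--                 else:
--                     out.append(' ' * body + line.lstrip())
--         else:
--             out.append(line)
--     lines[:] = out
--     return lines
-- ===== Notes on version B (the rewrite author's own statement) =====
-- stated objective: alternative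
-- what changed: Replaces A's backward break-at-first 'def ' scan followed by an in-place while-loop rewrite with a single forward state-machine pass (scan/fix/copy modes) over enumerate(lines) that tracks the last def indent, builds a fresh output list, and writes it back via lines[:] = out.
import Mathlib
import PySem

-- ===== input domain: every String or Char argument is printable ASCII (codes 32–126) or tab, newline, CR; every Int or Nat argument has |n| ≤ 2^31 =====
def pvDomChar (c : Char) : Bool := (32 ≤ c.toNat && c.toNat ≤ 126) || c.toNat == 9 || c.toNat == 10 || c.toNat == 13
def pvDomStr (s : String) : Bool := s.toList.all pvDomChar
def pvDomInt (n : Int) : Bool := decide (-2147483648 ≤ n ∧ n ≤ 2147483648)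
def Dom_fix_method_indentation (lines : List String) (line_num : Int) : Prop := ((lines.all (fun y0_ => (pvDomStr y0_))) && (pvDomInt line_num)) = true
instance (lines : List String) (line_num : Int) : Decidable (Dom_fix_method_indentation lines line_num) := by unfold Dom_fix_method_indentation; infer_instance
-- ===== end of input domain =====

-- B replaces A's backward break-at-first 'def ' scan plus in-place while-loop rewrite by ONE forward
-- state-machine pass (scan/fix/copy) over enumerate(lines) building a fresh list, written back with
-- lines[:] = out (alternative decomposition, same cost; both Pythons mutate `lines` identically).

-- ===== PORT A =====
-- len(s) - len(s.lstrip())  (the identical Python expression occurs in both programs)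
def pvIndent (s : String) : Int := PySem.Str.len s - PySem.Str.len (PySem.Str.lstrip s)

-- ' ' * bi + s.lstrip()  (' '*bi ported by hand as replicate bi.toNat; exact: Python's str*n is '' for n<0)
def pvPad (bi : Int) (s : String) : String :=
  String.ofList (List.replicate bi.toNat ' ') ++ PySem.Str.lstrip s

-- lines[i].strip().startswith('def ')
def pvIsDef (lines : List String) (i : Int) : Bool :=
  PySem.Str.startswith (PySem.Str.strip ((PySem.List.pyGet? lines i).getD "")) "def "

-- `for i in range(idx-1, -1, -1): if …: …; break` — the downward loop over the n indices n-1,…,0,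
-- stopping at the first index whose line passes the 'def ' test
def findDefA (lines : List String) : Nat → Option Int
  | 0 => none
  | n+1 => if pvIsDef lines (n : Int) then some (n : Int) else findDefA lines n

-- the `while j < len(lines) and lines[j].strip():` loop of A; fuel ≥ len(lines) - j bounds the iterations
def fixWhileA (lines : List String) (bi : Int) (j : Nat) : Nat → List String
  | 0 => lines
  | fuel+1 =>
    if j < lines.length ∧ PySem.Str.strip (lines.getD j "") ≠ "" then
      let lines' :=
        if PySem.Str.strip (lines.getD j "") ≠ "" then  -- A's redundant inner check, kept
          if pvIndent (lines.getD j "") ≠ bi ∧ ¬ PySem.Str.startswith (PySem.Str.strip (lines.getD j "")) "#"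
          then lines.set j (pvPad bi (lines.getD j ""))
          else lines
        else lines
      fixWhileA lines' bi (j+1) fuel
    else lines

def fix_method_indentation (lines : List String) (line_num : Int) : List String :=
  let idx := line_num - 1
  match findDefA lines idx.toNat with  -- range(idx-1,-1,-1) visits the idx.toNat indices idx-1,…,0
  | none => lines
  | some i =>
    let def_indent := pvIndent ((PySem.List.pyGet? lines i).getD "")
    let body_indent := def_indent + 4
    fixWhileA lines body_indent idx.toNat lines.length

-- ===== PORT B =====
-- Source B's `mode` variable ('scan' / 'fix' / 'copy')
inductive PvMode | scan | fix | copy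
deriving DecidableEq, Repr

-- the body of Source B's single for-loop over enumerate(lines): state = (mode, def_indent, out)
def pvStepB (idx : Int) : (PvMode × Option Int × List String) → (Int × String) → (PvMode × Option Int × List String)
  | (mode, di, out), (k, line) =>
    let mode := if mode = PvMode.scan ∧ idx ≤ k then (if di ≠ none then PvMode.fix else PvMode.copy) else mode
    match mode with
    | PvMode.scan =>
        (PvMode.scan,
         (if PySem.Str.startswith (PySem.Str.strip line) "def " then some (pvIndent line) else di),
         out ++ [line])
    | PvMode.fix =>
        if PySem.Str.strip line = "" then (PvMode.copy, di, out ++ [line])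
        else
          let body := di.getD 0 + 4   -- def_indent is an int whenever mode = 'fix' in Source B; the default is unreachable
          if PySem.Str.startswith (PySem.Str.strip line) "#" ∨ pvIndent line = body
          then (PvMode.fix, di, out ++ [line])
          else (PvMode.fix, di, out ++ [pvPad body line])
    | PvMode.copy => (PvMode.copy, di, out ++ [line])

def fix_method_indentation_alt (lines : List String) (line_num : Int) : List String :=
  let idx := line_num - 1
  let st := (PySem.List.enumerate lines 0).foldl (pvStepB idx) (PvMode.scan, none, [])
  st.2.2   -- lines[:] = out; return lines — the returned value is out

-- ===== PRECONDITION & SPEC =====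
-- Pre_ excludes exactly the inputs where Python A raises IndexError (its backward scan starts by reading
-- lines[line_num-2] with line_num-2 ≥ len(lines)).
def Pre_fix_method_indentation (lines : List String) (line_num : Int) : Prop :=
  line_num ≤ lines.length + 1
instance (lines : List String) (line_num : Int) : Decidable (Pre_fix_method_indentation lines line_num) := by
  unfold Pre_fix_method_indentation; infer_instance

def pvWitness_fix_method_indentation : List String × Int := (["def f():", "  x = 1"], 2)

def Spec_fix_method_indentation (lines : List String) (line_num : Int) (out : List String) : Prop := out = fix_method_indentation_alt lines line_num
instance (lines : List String) (line_num : Int) (out : List String) : Decidable (Spec_fix_method_indentation lines line_num out) := by unfold Spec_fix_method_indentation; infer_instance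

-- ===== CLAIM =====
def Claim_equal_fix_method_indentation : Prop := ∀ (lines : List String) (line_num : Int), Dom_fix_method_indentation lines line_num → Pre_fix_method_indentation lines line_num → Spec_fix_method_indentation lines line_num (fix_method_indentation lines line_num)

-- ===== LEMMAS AND PROOFS =====

-- line.strip().startswith('def ') as a predicate on the string
def pvIsDefS (s : String) : Bool := PySem.Str.startswith (PySem.Str.strip s) "def "

-- the per-line rewrite both programs apply inside the block
def pvFixOne (bi : Int) (s : String) : String :=
  if PySem.Str.startswith (PySem.Str.strip s) "#" ∨ pvIndent s = bi then s else pvPad bi s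

-- specification of the fix phase: rewrite the leading non-blank lines, keep the rest
def fSpec : List String → Int → List String
  | [], _ => []
  | line :: rest, bi =>
    if PySem.Str.strip line = "" then line :: rest else pvFixOne bi line :: fSpec rest bi

-- specification of the whole forward pass, k = absolute index of the head line
def wSpec (idx : Int) : List String → Int → Option Int → List String
  | [], _, _ => []
  | line :: rest, k, di =>
    if k < idx then
      line :: wSpec idx rest (k+1) (if pvIsDefS line then some (pvIndent line) else di)
    else match di with
      | none => line :: rest
      | some d => fSpec (line :: rest) (d + 4)

-- the def_indent accumulated over a scanned prefix
def lastDefF (l : List String) (di : Option Int) : Option Int :=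
  l.foldl (fun acc line => if pvIsDefS line then some (pvIndent line) else acc) di

-- A's per-line update equals B's
def pvFixA (bi : Int) (s : String) : String :=
  if pvIndent s ≠ bi ∧ ¬ PySem.Str.startswith (PySem.Str.strip s) "#" then pvPad bi s else s

lemma pvFixA_eq_fixOne (bi : Int) : pvFixA bi = pvFixOne bi := by
  funext s
  simp only [pvFixA, pvFixOne]
  by_cases h2 : pvIndent s = bi <;>
    cases h1 : PySem.Chars.startswith (PySem.Chars.strip s.toList) ['#'] <;>
      simp [h1, h2]

lemma pvSet_getD_self (l : List String) (j : Nat) (h : j < l.length) :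
    l.set j (l.getD j "") = l := by
  have hg : l.getD j "" = l[j] := by simp [List.getD, List.getElem?_eq_getElem h]
  rw [hg]; exact List.set_getElem_self h

lemma pvTake_succ_set (l : List String) (j : Nat) (v : String) (h : j < l.length) :
    (l.set j v).take (j+1) = l.take j ++ [v] := by
  induction l generalizing j with
  | nil => simp at h
  | cons a t ih =>
    cases j with
    | zero => simp
    | succ k =>
      simp only [List.set, List.take_succ_cons, List.take]
      rw [ih k (by simpa using h)]
      simp

lemma pvDrop_set_lt (l : List String) (i : Nat) (v : String) (n : Nat) (h : i < n) :
    (l.set i v).drop n = l.drop n := by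
  induction l generalizing i n with
  | nil => simp
  | cons a t ih =>
    cases n with
    | zero => omega
    | succ m =>
      cases i with
      | zero => simp
      | succ k =>
        simp only [List.set, List.drop_succ_cons]
        exact ih k m (by omega)

-- A's while loop = keep prefix, fSpec on the suffix
lemma fixWhileA_eq_fSpec (bi : Int) :
    ∀ (fuel : Nat) (lines : List String) (j : Nat), lines.length - j ≤ fuel →
      fixWhileA lines bi j fuel = lines.take j ++ fSpec (lines.drop j) bi := by
  intro fuel
  induction fuel with
  | zero =>
    intro lines j hle
    have hj : lines.length ≤ j := by omega
    rw [List.drop_eq_nil_of_le hj, List.take_of_length_le hj]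
    simp [fixWhileA, fSpec]
  | succ n ih =>
    intro lines j hle
    by_cases hc : j < lines.length ∧ PySem.Str.strip (lines.getD j "") ≠ ""
    · obtain ⟨hj, hs⟩ := hc
      have hgd : lines.getD j "" = lines[j] := by simp [List.getD, List.getElem?_eq_getElem hj]
      have hstep : fixWhileA lines bi j (n+1)
          = fixWhileA (lines.set j (pvFixA bi (lines.getD j ""))) bi (j+1) n := by
        simp only [fixWhileA]
        rw [if_pos ⟨hj, hs⟩, if_pos hs]
        unfold pvFixA
        split_ifs with h
        · rfl
        · rw [pvSet_getD_self lines j hj]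
      rw [hstep, ih _ (j+1) (by simp only [List.length_set]; omega)]
      rw [pvTake_succ_set lines j _ hj, pvDrop_set_lt lines j _ (j+1) (by omega)]
      rw [List.drop_eq_getElem_cons hj]
      have hs' : PySem.Str.strip lines[j] ≠ "" := by rwa [hgd] at hs
      simp only [fSpec, if_neg hs', hgd, pvFixA_eq_fixOne]
      simp
    · have hF : fixWhileA lines bi j (n+1) = lines := by
        simp only [fixWhileA]; rw [if_neg hc]
      rw [hF]
      by_cases hj : j < lines.length
      · have hs : PySem.Str.strip (lines.getD j "") = "" := by
          by_contra h; exact hc ⟨hj, h⟩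
        have hgd : lines.getD j "" = lines[j] := by simp [List.getD, List.getElem?_eq_getElem hj]
        have hs2 : PySem.Str.strip lines[j] = "" := hgd ▸ hs
        rw [List.drop_eq_getElem_cons hj]
        simp only [fSpec, hs2, if_pos]
        rw [← List.drop_eq_getElem_cons hj, List.take_append_drop]
      · have hj' : lines.length ≤ j := by omega
        rw [List.drop_eq_nil_of_le hj', List.take_of_length_le hj']
        simp [fSpec]

-- the copy phase appends the rest unchanged
lemma run_copy (idx : Int) :
    ∀ (l : List (Int × String)) (di : Option Int) (out : List String),
      l.foldl (pvStepB idx) (PvMode.copy, di, out) = (PvMode.copy, di, out ++ l.map (·.2)) := by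
  intro l
  induction l with
  | nil => simp
  | cons p t ih =>
    intro di out
    obtain ⟨k, line⟩ := p
    simp only [List.foldl_cons, pvStepB]
    simp only [show (PvMode.copy = PvMode.scan ∧ idx ≤ k) = False by simp, if_false]
    rw [ih]
    simp

-- the fix phase computes fSpec
lemma run_fix (idx : Int) :
    ∀ (l : List String) (s : Int) (d : Int) (out : List String),
      ((PySem.List.enumerate l s).foldl (pvStepB idx) (PvMode.fix, some d, out)).2.2
        = out ++ fSpec l (d + 4) := by
  intro l
  induction l with
  | nil => intro s d out; simp [PySem.List.enumerate_nil, fSpec]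
  | cons line t ih =>
    intro s d out
    rw [PySem.List.enumerate_cons, List.foldl_cons]
    by_cases hb : PySem.Str.strip line = ""
    · have hstep : pvStepB idx (PvMode.fix, some d, out) (s, line)
          = (PvMode.copy, some d, out ++ [line]) := by
        simp [pvStepB, hb]
      rw [hstep, run_copy idx]
      simp [fSpec, hb, PySem.List.map_snd_enumerate]
    · have hstep : pvStepB idx (PvMode.fix, some d, out) (s, line)
          = (PvMode.fix, some d, out ++ [pvFixOne (d + 4) line]) := by
        simp only [pvStepB, pvFixOne]
        simp only [show (PvMode.fix = PvMode.scan ∧ idx ≤ s) = False by simp, if_false]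
        rw [if_neg hb]
        simp only [Option.getD_some]
        split_ifs <;> simp_all
      rw [hstep, ih]
      simp [fSpec, hb]

-- the scan phase computes wSpec
lemma run_scan (idx : Int) :
    ∀ (l : List String) (k : Int) (di : Option Int) (out : List String),
      ((PySem.List.enumerate l k).foldl (pvStepB idx) (PvMode.scan, di, out)).2.2
        = out ++ wSpec idx l k di := by
  intro l
  induction l with
  | nil => intro k di out; simp [PySem.List.enumerate_nil, wSpec]
  | cons line t ih =>
    intro k di out
    rw [PySem.List.enumerate_cons, List.foldl_cons]
    by_cases hk : k < idx
    · have hstep : pvStepB idx (PvMode.scan, di, out) (k, line)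
          = (PvMode.scan, (if pvIsDefS line then some (pvIndent line) else di), out ++ [line]) := by
        simp [pvStepB, pvIsDefS, show ¬ idx ≤ k by omega]
      rw [hstep, ih]
      simp [wSpec, hk]
    · match di with
      | none =>
        have hstep : pvStepB idx (PvMode.scan, none, out) (k, line)
            = (PvMode.copy, none, out ++ [line]) := by
          simp [pvStepB, show idx ≤ k by omega]
        rw [hstep, run_copy idx]
        simp [wSpec, hk, PySem.List.map_snd_enumerate]
      | some d =>
        have hstep : pvStepB idx (PvMode.scan, some d, out) (k, line)
            = pvStepB idx (PvMode.fix, some d, out) (k, line) := by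
          simp [pvStepB, show idx ≤ k by omega]
        rw [hstep]
        have := run_fix idx (line :: t) k d out
        rw [PySem.List.enumerate_cons, List.foldl_cons] at this
        rw [this]
        simp [wSpec, hk]

-- wSpec in terms of take/drop and lastDefF
lemma wSpec_eq (idx : Int) :
    ∀ (l : List String) (k : Int) (di : Option Int),
      wSpec idx l k di =
        l.take (idx - k).toNat ++
          (match lastDefF (l.take (idx - k).toNat) di with
           | none => l.drop (idx - k).toNat
           | some d => fSpec (l.drop (idx - k).toNat) (d + 4)) := by
  intro l
  induction l with
  | nil =>
    intro k di
    cases di <;> simp [wSpec, fSpec, lastDefF]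
  | cons line rest ih =>
    intro k di
    by_cases hk : k < idx
    · have hm : (idx - k).toNat = (idx - (k+1)).toNat + 1 := by omega
      simp only [wSpec, if_pos hk]
      rw [ih, hm]
      simp only [List.take_succ_cons, List.drop_succ_cons]
      have hl : lastDefF (line :: rest.take (idx - (k+1)).toNat) di
          = lastDefF (rest.take (idx - (k+1)).toNat)
              (if pvIsDefS line then some (pvIndent line) else di) := by
        simp [lastDefF]
      rw [hl]
      cases h : lastDefF (rest.take (idx - (k+1)).toNat)
          (if pvIsDefS line then some (pvIndent line) else di) <;> simp
    · have hm : (idx - k).toNat = 0 := by omega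
      simp only [wSpec, if_neg hk, hm]
      cases di <;> simp [lastDefF]

-- B's forward last-match fold gives the indent of the line A's backward first-match scan finds
lemma lastDefF_eq_findDefA (lines : List String) :
    ∀ n : Nat, n ≤ lines.length →
      lastDefF (lines.take n) none
        = (findDefA lines n).map (fun i => pvIndent ((PySem.List.pyGet? lines i).getD "")) := by
  intro n
  induction n with
  | zero => intro _; simp [lastDefF, findDefA]
  | succ n ih =>
    intro h
    have hn : n < lines.length := by omega
    have ht : lines.take (n+1) = lines.take n ++ [lines[n]] := by
      rw [List.take_add_one, List.getElem?_eq_getElem hn]; rfl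
    have hget : (PySem.List.pyGet? lines (n : Int)).getD "" = lines[n] := by
      simp [List.getElem?_eq_getElem hn]
    have hisdef : pvIsDef lines (n : Int) = pvIsDefS lines[n] := by
      rw [pvIsDef, pvIsDefS, hget]
    rw [ht]
    simp only [lastDefF, List.foldl_append, List.foldl_cons, List.foldl_nil]
    rw [findDefA, hisdef]
    cases hD : pvIsDefS lines[n] with
    | true => simp [List.getElem?_eq_getElem hn]
    | false =>
      simp only [Bool.false_eq_true, if_false]
      exact ih (by omega)

-- ===== VERDICT =====
theorem fix_method_indentation_spec : Claim_equal_fix_method_indentation := by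
  unfold Claim_equal_fix_method_indentation
  intro lines line_num _ hpre
  unfold Pre_fix_method_indentation at hpre
  unfold Spec_fix_method_indentation
  simp only [fix_method_indentation, fix_method_indentation_alt]
  rw [run_scan (line_num - 1) lines 0 none [], List.nil_append, wSpec_eq]
  simp only [Int.sub_zero]
  by_cases hneg : line_num - 1 ≤ 0
  · have h1 : (line_num - 1).toNat = 0 := by omega
    rw [h1]
    simp [findDefA, lastDefF]
  · have hle : (line_num - 1).toNat ≤ lines.length := by omega
    rw [lastDefF_eq_findDefA lines _ hle]
    cases hF : findDefA lines (line_num - 1).toNat with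
    | none => simp
    | some i =>
      simp only [Option.map_some]
      rw [fixWhileA_eq_fSpec _ lines.length lines _ (Nat.sub_le _ _)]
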